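-- pv_equiv track=rewrite | github.com/amyteq/tt_share | h09a/P10_v9r6_a5.py | f_bruteforce
-- ===== SOURCE A (Python) =====
-- def f_bruteforce(n):
--     import math, itertools
--     best = None
--     for a in range(1,n):
--         for b in range(a+1,n):
--             c=n-a-b
--             if c<=b: continue
--             L=math.lcm(a,b,c)
--             if best is None or L<best:
--                 best=L
--     return best
-- ===== SOURCE B (Python) =====
-- def f_bruteforce(n):
--     # Scan candidate LCM values upward; the first L that has three distinct
--     # divisors a < b < c with a + b + c == n is the minimum achievable LCM.
--     # For n >= 6 the triple (1, 2, n-3) shows the answer is <= lcm(2, n-3) <= 2*n - 6,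
--     # so scanning L up to 2*n - 6 inclusive always succeeds.
--     if n < 6:
--         return None
--     for L in range(1, 2 * n - 5):
--         if _has_triple(n, L):
--             return L
--     return None  # unreachable for n >= 6
--
--
-- def _divisors(L):
--     ds = []
--     d = 1
--     while d * d <= L:
--         if L % d == 0:
--             ds.append(d)
--             if d != L // d:
--                 ds.append(L // d)
--         d += 1
--     return ds
--
--
-- def _has_triple(n, L):
--     divs = _divisors(L)
--     for a in divs:
--         for b in divs:
--             c = n - a - b
--             if a < b and b < c and L % c == 0:
--                 return True
--     return False
-- ===== Notes on version B (the rewrite author's own statement) =====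
-- stated objective: faster
-- what changed: Instead of enumerating every pair (a,b) and taking the minimum lcm of the resulting triples, B scans candidate LCM values upward (listing each candidate's divisors by trial division up to its square root) and returns the first candidate that has three distinct divisors summing to n; a simple explicit triple bounds the scan linearly in n, and it stops as soon as it reaches the answer.
import Mathlib
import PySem

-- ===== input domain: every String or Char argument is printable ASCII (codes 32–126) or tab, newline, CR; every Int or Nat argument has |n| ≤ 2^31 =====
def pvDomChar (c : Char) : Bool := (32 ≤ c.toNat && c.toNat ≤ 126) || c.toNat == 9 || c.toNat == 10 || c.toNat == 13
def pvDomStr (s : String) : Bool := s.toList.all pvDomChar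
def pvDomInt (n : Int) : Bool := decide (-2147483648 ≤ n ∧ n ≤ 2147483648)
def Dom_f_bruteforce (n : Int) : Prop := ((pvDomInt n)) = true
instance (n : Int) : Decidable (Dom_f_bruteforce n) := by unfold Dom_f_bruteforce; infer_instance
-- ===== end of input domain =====

-- B replaces A's quadratic pair enumeration by an upward scan over candidate
-- LCM values L, returning the first L that has three distinct divisors summing to n
-- (measured faster; same return value everywhere).

-- ===== PORT A =====
-- math.lcm of two Python ints (nonnegative result)
def pyLcm (a b : Int) : Int := (Int.lcm a b : Int)

def f_bruteforce (n : Int) : Option Int :=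
  (PySem.List.pyRange 1 n 1).foldl (fun best a =>
    (PySem.List.pyRange (a + 1) n 1).foldl (fun best b =>
      let c := n - a - b
      if c ≤ b then best
      else
        let L := pyLcm (pyLcm a b) c
        match best with
        | none => some L
        | some m => if L < m then some L else some m) best) none

-- ===== PORT B =====
-- _divisors(L): trial division up to the square root, collecting d and L // d
def pyDivisors (L d : Int) : List Int :=
  if _h : d * d ≤ L then
    (if PySem.Int.mod L d == 0 then
       d :: (if d = PySem.Int.floordiv L d then [] else [PySem.Int.floordiv L d])
     else []) ++ pyDivisors L (d + 1)
  else []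
termination_by (L + 1 - d).toNat
decreasing_by
  have hd : d ≤ L := by nlinarith
  omega

-- _has_triple(n, L): three distinct divisors of L summing to n?
def hasTriple (n L : Int) : Bool :=
  (pyDivisors L 1).any (fun a => (pyDivisors L 1).any (fun b =>
    let c := n - a - b
    decide (a < b) && decide (b < c) && (PySem.Int.mod L c == 0)))

def f_bruteforce_alt (n : Int) : Option Int :=
  if n < 6 then none
  else (PySem.List.pyRange 1 (2 * n - 5) 1).findSome?
    (fun L => if hasTriple n L then some L else none)

-- ===== PRECONDITION & SPEC =====
def Spec_f_bruteforce (n : Int) (out : Option Int) : Prop := out = f_bruteforce_alt n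
instance (n : Int) (out : Option Int) : Decidable (Spec_f_bruteforce n out) := by unfold Spec_f_bruteforce; infer_instance

-- ===== CLAIM (what is proved, stated in full; the proofs are below) =====
def Claim_equal_f_bruteforce : Prop := ∀ (n : Int), Dom_f_bruteforce n → Spec_f_bruteforce n (f_bruteforce n)

-- ===== LEMMAS AND PROOFS =====

-- the valid triples: 1 ≤ a < b < c with a + b + c = n
def Tn (n a b c : Int) : Prop := 1 ≤ a ∧ a < b ∧ b < c ∧ a + b + c = n

-- A's accumulator update, as a named function
def pvStep (best : Option Int) (L : Int) : Option Int :=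
  match best with
  | none => some L
  | some m => if L < m then some L else some m

def minFold (l : List Int) : Option Int := l.foldl pvStep none

-- the list of LCM values A's double loop feeds to its running minimum
def cand (n : Int) : List Int :=
  (PySem.List.pyRange 1 n 1).flatMap (fun a =>
    (((PySem.List.pyRange (a + 1) n 1).filter (fun b => decide (¬ (n - a - b ≤ b)))).map
      (fun b => pyLcm (pyLcm a b) (n - a - b))))

lemma foldl_ite_skip_filter_map {α β γ : Type} (p : β → Prop) [DecidablePred p]
    (f : α → γ → α) (g : β → γ) (l : List β) (init : α) :
    l.foldl (fun s x => if p x then s else f s (g x)) init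
      = ((l.filter (fun x => decide (¬ p x))).map g).foldl f init := by
  induction l generalizing init with
  | nil => rfl
  | cons x xs ih => by_cases h : p x <;> simp [h, ih]

lemma foldl_foldl_flatMap {α β γ : Type} (f : α → γ → α) (g : β → List γ)
    (l : List β) (init : α) :
    l.foldl (fun s x => (g x).foldl f s) init = (l.flatMap g).foldl f init := by
  induction l generalizing init with
  | nil => rfl
  | cons x xs ih => simp [List.flatMap_cons, List.foldl_append, ih]

lemma A_eq (n : Int) : f_bruteforce n = minFold (cand n) := by
  unfold f_bruteforce minFold cand
  rw [← foldl_foldl_flatMap]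
  apply PySem.List.foldl_congr_mem
  intro acc a _
  exact foldl_ite_skip_filter_map (fun b => n - a - b ≤ b) pvStep
    (fun b => pyLcm (pyLcm a b) (n - a - b)) _ acc

lemma foldl_step_some (l : List Int) (b : Int) :
    ∃ m, l.foldl pvStep (some b) = some m ∧ (m ∈ l ∨ m = b) ∧ m ≤ b ∧ ∀ x ∈ l, m ≤ x := by
  induction l generalizing b with
  | nil => exact ⟨b, rfl, Or.inr rfl, le_refl b, by simp⟩
  | cons x xs ih =>
    by_cases h : x < b
    · obtain ⟨m, h1, h2, h3, h4⟩ := ih x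
      refine ⟨m, ?_, ?_, by omega, ?_⟩
      · simpa [pvStep, h] using h1
      · rcases h2 with h2 | h2
        · exact Or.inl (List.mem_cons_of_mem _ h2)
        · exact Or.inl (by simp [h2])
      · intro y hy
        rcases List.mem_cons.mp hy with rfl | hy
        · exact h3
        · exact h4 y hy
    · obtain ⟨m, h1, h2, h3, h4⟩ := ih b
      refine ⟨m, ?_, ?_, h3, ?_⟩
      · simpa [pvStep, h] using h1
      · rcases h2 with h2 | h2
        · exact Or.inl (List.mem_cons_of_mem _ h2)
        · exact Or.inr h2
      · intro y hy
        rcases List.mem_cons.mp hy with rfl | hy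
        · omega
        · exact h4 y hy

lemma minFold_spec (l : List Int) (hne : l ≠ []) :
    ∃ m, minFold l = some m ∧ m ∈ l ∧ ∀ x ∈ l, m ≤ x := by
  match l with
  | [] => exact absurd rfl hne
  | x :: xs =>
    obtain ⟨m, h1, h2, h3, h4⟩ := foldl_step_some xs x
    refine ⟨m, by simpa [minFold, pvStep] using h1, ?_, ?_⟩
    · rcases h2 with h2 | h2
      · exact List.mem_cons_of_mem _ h2
      · simp [h2]
    · intro y hy
      rcases List.mem_cons.mp hy with rfl | hy
      · exact h3
      · exact h4 y hy

lemma mem_cand {n x : Int} :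
    x ∈ cand n ↔ ∃ a b c, Tn n a b c ∧ x = pyLcm (pyLcm a b) c := by
  unfold cand Tn
  simp only [List.mem_flatMap, List.mem_map, List.mem_filter,
    PySem.List.mem_pyRange_one, decide_eq_true_eq]
  constructor
  · rintro ⟨a, ⟨ha1, _⟩, b, ⟨⟨hb1, _⟩, hb3⟩, rfl⟩
    exact ⟨a, b, n - a - b, ⟨ha1, by omega, by omega, by omega⟩, rfl⟩
  · rintro ⟨a, b, c, ⟨h1, h2, h3, h4⟩, rfl⟩
    refine ⟨a, ⟨h1, by omega⟩, b, ⟨⟨by omega, by omega⟩, by omega⟩, ?_⟩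
    have hc : n - a - b = c := by omega
    rw [hc]

lemma mem_pyDivisorsFrom {L : Int} (_hL : 1 ≤ L) :
    ∀ (d x : Int), 1 ≤ d →
      (x ∈ pyDivisors L d ↔
        ∃ e, d ≤ e ∧ e * e ≤ L ∧ e ∣ L ∧ (x = e ∨ x = PySem.Int.floordiv L e)) := by
  intro d
  induction d using pyDivisors.induct L with
  | case1 d hg ih =>
    intro x hd
    rw [pyDivisors, dif_pos hg, List.mem_append, ih x (by omega)]
    constructor
    · rintro (hx | ⟨e, he1, he2, he3, he4⟩)
      · by_cases hmod : PySem.Int.mod L d == 0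
        · rw [if_pos hmod] at hx
          have hdvd : d ∣ L := (PySem.Int.mod_eq_zero_iff_dvd L d).mp (by simpa using hmod)
          rcases List.mem_cons.mp hx with rfl | hx
          · exact ⟨x, le_refl x, hg, hdvd, Or.inl rfl⟩
          · refine ⟨d, le_refl d, hg, hdvd, Or.inr ?_⟩
            by_cases hq : d = PySem.Int.floordiv L d
            · rw [if_pos hq] at hx; simp at hx
            · rw [if_neg hq] at hx; simpa using hx
        · rw [if_neg hmod] at hx; simp at hx
      · exact ⟨e, by omega, he2, he3, he4⟩
    · rintro ⟨e, he1, he2, he3, he4⟩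
      by_cases hde : e = d
      · subst hde
        left
        have hmod : (PySem.Int.mod L e == 0) = true := by
          simp [PySem.Int.mod_eq_zero_iff_dvd, he3]
        rw [if_pos hmod]
        rcases he4 with rfl | rfl
        · exact List.mem_cons_self
        · by_cases hq : e = PySem.Int.floordiv L e
          · rw [← hq]; exact List.mem_cons_self
          · simp [hq]
      · exact Or.inr ⟨e, by omega, he2, he3, he4⟩
  | case2 d hg =>
    intro x hd
    rw [pyDivisors, dif_neg hg]
    simp only [List.not_mem_nil, false_iff]
    rintro ⟨e, he1, he2, he3, _⟩
    have : d * d ≤ e * e := by nlinarith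
    omega

lemma mem_pyDivisors {L d : Int} (hL : 1 ≤ L) : d ∈ pyDivisors L 1 ↔ 1 ≤ d ∧ d ∣ L := by
  rw [mem_pyDivisorsFrom hL 1 d (le_refl 1)]
  constructor
  · rintro ⟨e, he1, he2, he3, (rfl | rfl)⟩
    · exact ⟨he1, he3⟩
    · obtain ⟨k, hk⟩ := he3
      have hk1 : 1 ≤ k := by nlinarith
      have hq : PySem.Int.floordiv L e = k := by
        rw [PySem.Int.floordiv_eq_ediv_of_pos (by omega), hk,
          Int.mul_ediv_cancel_left k (by omega : e ≠ 0)]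
      rw [hq]
      exact ⟨hk1, ⟨e, by rw [hk]; ring⟩⟩
  · rintro ⟨h1, h2⟩
    obtain ⟨k, hk⟩ := h2
    have hk1 : 1 ≤ k := by nlinarith
    by_cases hsq : d * d ≤ L
    · exact ⟨d, h1, hsq, ⟨k, hk⟩, Or.inl rfl⟩
    · refine ⟨k, hk1, by nlinarith, ⟨d, by rw [hk]; ring⟩, Or.inr ?_⟩
      rw [PySem.Int.floordiv_eq_ediv_of_pos (by omega), hk, mul_comm,
        Int.mul_ediv_cancel_left d (by omega : k ≠ 0)]

lemma hasTriple_iff {n L : Int} (hL : 1 ≤ L) :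
    hasTriple n L = true ↔ ∃ a b c, Tn n a b c ∧ a ∣ L ∧ b ∣ L ∧ c ∣ L := by
  unfold hasTriple Tn
  simp only [List.any_eq_true, mem_pyDivisors hL, Bool.and_eq_true, decide_eq_true_eq,
    beq_iff_eq, PySem.Int.mod_eq_zero_iff_dvd]
  constructor
  · rintro ⟨a, ⟨ha1, ha2⟩, b, ⟨hb1, hb2⟩, ⟨hab, hbc⟩, hc⟩
    exact ⟨a, b, n - a - b, ⟨ha1, hab, hbc, by omega⟩, ha2, hb2, hc⟩
  · rintro ⟨a, b, c, ⟨h1, h2, h3, h4⟩, da, db, dc⟩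
    refine ⟨a, ⟨h1, da⟩, b, ⟨by omega, db⟩, ⟨h2, by omega⟩, ?_⟩
    have hc : n - a - b = c := by omega
    rw [hc]; exact dc

lemma pyLcm_pos {a b : Int} (ha : a ≠ 0) (hb : b ≠ 0) : 0 < pyLcm a b := by
  unfold pyLcm
  have : Int.lcm a b ≠ 0 :=
    Nat.lcm_ne_zero (Int.natAbs_ne_zero.mpr ha) (Int.natAbs_ne_zero.mpr hb)
  exact_mod_cast Nat.pos_of_ne_zero this

lemma dvd_pyLcm_left (a b : Int) : a ∣ pyLcm a b := Int.dvd_lcm_left a b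
lemma dvd_pyLcm_right (a b : Int) : b ∣ pyLcm a b := Int.dvd_lcm_right a b

lemma pyLcm_dvd {a b c : Int} (h1 : a ∣ c) (h2 : b ∣ c) : pyLcm a b ∣ c := by
  unfold pyLcm
  rw [Int.coe_lcm]
  exact lcm_dvd h1 h2

lemma lcm3_pos {a b c : Int} (ha : 0 < a) (hb : 0 < b) (hc : 0 < c) :
    0 < pyLcm (pyLcm a b) c :=
  pyLcm_pos (by have := pyLcm_pos (by omega : a ≠ 0) (by omega : b ≠ 0); omega) (by omega)

lemma lcm3_dvd {a b c L : Int} (ha : a ∣ L) (hb : b ∣ L) (hc : c ∣ L) :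
    pyLcm (pyLcm a b) c ∣ L := pyLcm_dvd (pyLcm_dvd ha hb) hc

lemma main_eq (n : Int) : f_bruteforce n = f_bruteforce_alt n := by
  by_cases h6 : n < 6
  · have hc : cand n = [] := by
      rw [List.eq_nil_iff_forall_not_mem]
      intro x hx
      obtain ⟨a, b, c, ⟨h1, h2, h3, h4⟩, _⟩ := mem_cand.mp hx
      omega
    rw [A_eq, hc]
    simp [f_bruteforce_alt, h6, minFold]
  · have hn : (6 : Int) ≤ n := by omega
    have hT : Tn n 1 2 (n - 3) := ⟨le_refl 1, by omega, by omega, by omega⟩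
    have hmem : pyLcm (pyLcm 1 2) (n - 3) ∈ cand n := mem_cand.mpr ⟨1, 2, n - 3, hT, rfl⟩
    obtain ⟨m, hA, hm, hmin⟩ := minFold_spec (cand n)
      (by intro h; rw [h] at hmem; exact (List.not_mem_nil).elim hmem)
    obtain ⟨a, b, c, hTm, hmval⟩ := mem_cand.mp hm
    obtain ⟨ht1, ht2, ht3, ht4⟩ := hTm
    have hpos : 1 ≤ m := by
      have := lcm3_pos (a := a) (b := b) (c := c) (by omega) (by omega) (by omega)
      omega
    have hbound : m < 2 * n - 5 := by
      have h1 : m ≤ pyLcm (pyLcm 1 2) (n - 3) := hmin _ hmem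
      have h2 : pyLcm (pyLcm 1 2) (n - 3) ≤ 2 * (n - 3) := by
        apply Int.le_of_dvd (by omega)
        exact lcm3_dvd ⟨2 * (n - 3), by ring⟩ ⟨n - 3, by ring⟩ ⟨2, by ring⟩
      omega
    rw [A_eq, hA]
    unfold f_bruteforce_alt
    rw [if_neg (by omega)]
    rw [PySem.List.pyRange_one_append 1 m (2 * n - 5) hpos (le_of_lt hbound)]
    rw [List.findSome?_append]
    have hnone : (PySem.List.pyRange 1 m 1).findSome?
        (fun L => if hasTriple n L then some L else none) = none := by
      rw [List.findSome?_eq_none_iff]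
      intro L hL
      rw [PySem.List.mem_pyRange_one] at hL
      rw [if_neg]
      intro hTrip
      obtain ⟨a', b', c', hT', da, db, dc⟩ := (hasTriple_iff (by omega)).mp hTrip
      have hle : pyLcm (pyLcm a' b') c' ≤ L := Int.le_of_dvd (by omega) (lcm3_dvd da db dc)
      have hge : m ≤ pyLcm (pyLcm a' b') c' := hmin _ (mem_cand.mpr ⟨a', b', c', hT', rfl⟩)
      omega
    rw [hnone]
    rw [PySem.List.pyRange_one_cons hbound]
    have hTrue : hasTriple n m = true := by
      rw [hasTriple_iff (by omega)]
      refine ⟨a, b, c, ⟨ht1, ht2, ht3, ht4⟩, ?_, ?_, ?_⟩ <;> rw [hmval]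
      · exact dvd_trans (dvd_pyLcm_left a b) (dvd_pyLcm_left _ c)
      · exact dvd_trans (dvd_pyLcm_right a b) (dvd_pyLcm_left _ c)
      · exact dvd_pyLcm_right _ c
    simp [hTrue]

-- ===== VERDICT (by name: the statement is the Claim_ definition above) =====
theorem f_bruteforce_spec : Claim_equal_f_bruteforce := by
  intro n _
  unfold Spec_f_bruteforce
  exact main_eq n
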